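-- pv_equiv track=rewrite | github.com/Yaxin9Luo/OpenDesign | longcat_design/tools/ingest_document.py | _docx_pick_title
-- ===== SOURCE A (Python) =====
-- def _docx_pick_title(paras: list[tuple[str, str]]) -> str:
--     for style, text in paras:
--         if style.startswith("Title"):
--             return text
--     for style, text in paras:
--         if style.startswith("Heading 1") or style == "Heading 1":
--             return text
--     for _style, text in paras:
--         return text
--     return ""
-- ===== SOURCE B (Python) =====
-- def _docx_pick_title(paras: list[tuple[str, str]]) -> str:
--     title = heading = first = None
--     for style, text in paras:
--         if title is None and style.startswith("Title"):
--             title = text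
--         if heading is None and (style.startswith("Heading 1") or style == "Heading 1"):
--             heading = text
--         if first is None:
--             first = text
--     if title is not None:
--         return title
--     if heading is not None:
--         return heading
--     if first is not None:
--         return first
--     return ""
-- ===== Notes on version B (the rewrite author's own statement) =====
-- stated objective: simpler
-- what changed: Replaces A's three sequential scans over paras with one single pass that records the first Title-styled, first Heading-1-styled and first paragraph into None-initialised sentinels, then resolves them by priority.
import Mathlib
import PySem

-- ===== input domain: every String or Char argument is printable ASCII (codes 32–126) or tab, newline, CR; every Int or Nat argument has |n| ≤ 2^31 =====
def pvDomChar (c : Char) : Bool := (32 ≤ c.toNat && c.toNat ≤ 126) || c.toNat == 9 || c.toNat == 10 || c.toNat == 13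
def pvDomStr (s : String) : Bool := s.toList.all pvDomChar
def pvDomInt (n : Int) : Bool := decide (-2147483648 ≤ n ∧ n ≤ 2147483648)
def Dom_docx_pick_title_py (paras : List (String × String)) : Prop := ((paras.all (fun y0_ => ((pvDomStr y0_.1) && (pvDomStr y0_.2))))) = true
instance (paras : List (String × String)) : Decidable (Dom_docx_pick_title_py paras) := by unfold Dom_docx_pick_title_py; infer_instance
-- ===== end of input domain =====

-- B collapses A's three sequential scans into one pass with Option sentinels resolved by priority (objective: simpler).


-- ===== PORT A =====
-- first loop: return text of first paragraph whose style startswith "Title"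
def pvALoop1 : List (String × String) → Option String
  | [] => none
  | (style, text) :: rest =>
      if PySem.Str.startswith style "Title" then some text else pvALoop1 rest

-- second loop: first style startswith "Heading 1" (or == "Heading 1", redundant in Python too)
def pvALoop2 : List (String × String) → Option String
  | [] => none
  | (style, text) :: rest =>
      if PySem.Str.startswith style "Heading 1" || style == "Heading 1" then some text
      else pvALoop2 rest

-- third loop: returns the first text immediately
def pvALoop3 : List (String × String) → Option String
  | [] => none
  | (_, text) :: _ => some text

def docx_pick_title_py (paras : List (String × String)) : String :=
  match pvALoop1 paras with
  | some t => t
  | none =>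
    match pvALoop2 paras with
    | some t => t
    | none =>
      match pvALoop3 paras with
      | some t => t
      | none => ""

-- ===== PORT B =====
-- one pass; state = (title, heading, first) sentinels, each set on first match only
def pvBStep (acc : Option String × Option String × Option String) (p : String × String) :
    Option String × Option String × Option String :=
  let (title, heading, first) := acc
  let title := if title.isNone && PySem.Str.startswith p.1 "Title" then some p.2 else title
  let heading := if heading.isNone && (PySem.Str.startswith p.1 "Heading 1" || p.1 == "Heading 1")
    then some p.2 else heading
  let first := if first.isNone then some p.2 else first
  (title, heading, first)

def docx_pick_title_py_alt (paras : List (String × String)) : String :=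
  let (title, heading, first) := paras.foldl pvBStep (none, none, none)
  match title with
  | some t => t
  | none =>
    match heading with
    | some t => t
    | none =>
      match first with
      | some t => t
      | none => ""

-- ===== PRECONDITION & SPEC =====
def Spec_docx_pick_title_py (paras : List (String × String)) (out : String) : Prop := out = docx_pick_title_py_alt paras
instance (paras : List (String × String)) (out : String) : Decidable (Spec_docx_pick_title_py paras out) := by unfold Spec_docx_pick_title_py; infer_instance

-- ===== CLAIM (what is proved, stated in full; the proofs are below) =====
def Claim_equal_docx_pick_title_py : Prop := ∀ (paras : List (String × String)), Dom_docx_pick_title_py paras → Spec_docx_pick_title_py paras (docx_pick_title_py paras)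

-- ===== LEMMAS AND PROOFS =====
theorem pvBFold_eq (l : List (String × String)) (ti he fi : Option String) :
    l.foldl pvBStep (ti, he, fi) =
      (ti.orElse (fun _ => pvALoop1 l), he.orElse (fun _ => pvALoop2 l),
       fi.orElse (fun _ => pvALoop3 l)) := by
  induction l generalizing ti he fi with
  | nil => cases ti <;> cases he <;> cases fi <;> simp [Option.orElse, pvALoop1, pvALoop2, pvALoop3]
  | cons p rest ih =>
    obtain ⟨s, t⟩ := p
    simp only [List.foldl_cons, pvBStep, ih]
    cases ti <;> cases he <;> cases fi <;>
      simp [pvALoop1, pvALoop2, pvALoop3, Option.orElse] <;>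
      split_ifs <;> simp_all [Option.orElse]

-- ===== VERDICT (by name: the statement is the Claim_ definition above) =====
theorem docx_pick_title_py_spec : Claim_equal_docx_pick_title_py := by
  intro paras _
  unfold Spec_docx_pick_title_py docx_pick_title_py docx_pick_title_py_alt
  rw [pvBFold_eq]
  simp [Option.orElse]
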